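-- pv_equiv track=rewrite | github.com/doehy/algorithm | Programmers/tik_tak_to.py | o_check
-- ===== SOURCE A (Python) =====
-- from collections import deque
--
-- def o_check(board, dx, i, j): #밑으로만 쭉
--     flag = 0
--     q = deque()
--     for k in range(4):
--         visited = [[0] * 3 for _ in range(3)]
--         q.append((i,j))
--         visited[i][j] = 1
--         while q:
--             x,y = q.popleft()
--             nx = x + dx[k][0]
--             ny = y + dx[k][1]
--             if 0 <= nx < 3 and 0 <= ny < 3 and board[nx][ny] == 'O':
--                 if visited[nx][ny] == 0:
--                     visited[nx][ny] = visited[x][y] + 1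
--                     q.append((nx,ny))
--                     flag = max(flag,visited[nx][ny])
--     return flag
-- ===== SOURCE B (Python) =====
-- def o_check(board, dx, i, j):
--     # simpler: walk each of the 4 directions with a counter instead of BFS with a deque and visited matrix
--     best = 0
--     for k in range(4):
--         d0, d1 = dx[k][0], dx[k][1]
--         if d0 == 0 and d1 == 0:
--             continue  # degenerate direction: no new cell is ever reached
--         x, y, run = i, j, 1
--         while True:
--             nx, ny = x + d0, y + d1
--             if 0 <= nx < 3 and 0 <= ny < 3 and board[nx][ny] == 'O':
--                 run += 1
--                 best = max(best, run)
--                 x, y = nx, ny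
--             else:
--                 break
--     return best
-- ===== Notes on version B (the rewrite author's own statement) =====
-- stated objective: simpler
-- what changed: Replaces the per-direction BFS with a deque and a 3x3 visited matrix by a plain straight-line walk keeping only the current cell and a run counter (skipping the degenerate (0,0) direction, which can never reach a new cell).
import Mathlib
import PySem

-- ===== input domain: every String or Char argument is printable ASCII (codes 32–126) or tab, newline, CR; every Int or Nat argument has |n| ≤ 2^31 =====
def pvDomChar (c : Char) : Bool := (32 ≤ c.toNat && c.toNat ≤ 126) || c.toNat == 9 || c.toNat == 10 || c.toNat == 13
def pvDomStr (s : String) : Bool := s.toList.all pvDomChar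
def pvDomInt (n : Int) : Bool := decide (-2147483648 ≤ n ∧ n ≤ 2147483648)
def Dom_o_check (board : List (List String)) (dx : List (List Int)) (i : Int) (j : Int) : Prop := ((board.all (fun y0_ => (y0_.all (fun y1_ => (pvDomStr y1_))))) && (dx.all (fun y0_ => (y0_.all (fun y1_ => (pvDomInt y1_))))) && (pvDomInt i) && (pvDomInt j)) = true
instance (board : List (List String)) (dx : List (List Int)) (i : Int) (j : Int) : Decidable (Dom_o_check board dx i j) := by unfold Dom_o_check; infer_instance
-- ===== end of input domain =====

-- B replaces A's per-direction BFS (deque + 3x3 visited matrix) by a plain straight-line walk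
-- keeping only the current cell and a run counter (simpler, same cost).

-- ===== PORT A =====
-- `dx[k][m]`; the default is never hit under `Pre_o_check` (dx has ≥ 4 rows of length ≥ 2).
def dget (dx : List (List Int)) (k m : Int) : Int :=
  ((PySem.List.pyGet? dx k).bind (fun r => PySem.List.pyGet? r m)).getD 0

-- `board[x][y]`; `none` = out of range (where Python would raise IndexError — under
-- `Pre_o_check` every bounds-guarded access that is reached finds its cell present).
def bget (board : List (List String)) (x y : Int) : Option String :=
  (PySem.List.pyGet? board x).bind (fun r => PySem.List.pyGet? r y)

-- Python index into the fixed 3-element visited matrix: a negative index wraps from the end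
-- (exact for the -3 ≤ n < 3 range `Pre_o_check` admits, where Python does not raise).
def pyIx (n : Int) : Nat := if n < 0 then (n + 3).toNat else n.toNat

-- `visited[x][y]` / `visited[x][y] = w` on the 3×3 matrix, Python wraparound included.
def vget (v : List (List Int)) (x y : Int) : Int := ((v[pyIx x]?).getD [])[pyIx y]?.getD 0

def vset (v : List (List Int)) (x y w : Int) : List (List Int) :=
  v.set (pyIx x) (((v[pyIx x]?).getD []).set (pyIx y) w)

-- A's inner `while q:` loop. Fuel is a totality guard only: each append marks a fresh visited
-- cell (there are 9), so the Python loop pops at most 10 items and fuel 12 is never exhausted.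
def o_check_loop (board : List (List String)) (d0 d1 : Int) :
    Nat → List (Int × Int) → List (List Int) → Int → Int
  | 0, _, _, flag => flag
  | _ + 1, [], _, flag => flag
  | fuel + 1, (x, y) :: qs, v, flag =>
    let nx := x + d0
    let ny := y + d1
    if 0 ≤ nx ∧ nx < 3 ∧ 0 ≤ ny ∧ ny < 3 ∧ bget board nx ny = some "O" then
      if vget v nx ny = 0 then
        let v' := vset v nx ny (vget v x y + 1)
        o_check_loop board d0 d1 fuel (qs ++ [(nx, ny)]) v' (max flag (vget v' nx ny))
      else o_check_loop board d0 d1 fuel qs v flag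
    else o_check_loop board d0 d1 fuel qs v flag

def o_check (board : List (List String)) (dx : List (List Int)) (i : Int) (j : Int) : Int :=
  (PySem.List.pyRange 0 4 1).foldl
    (fun flag k =>
      o_check_loop board (dget dx k 0) (dget dx k 1) 12 [(i, j)]
        (vset (List.replicate 3 (List.replicate 3 0)) i j 1) flag) 0

-- ===== PORT B =====
-- B's `while True:` walk. Fuel is a totality guard only: it is entered with (d0,d1) ≠ (0,0),
-- so the position strictly advances inside [0,3)² and the Python loop iterates at most 3 times.
def o_check_walk (board : List (List String)) (d0 d1 : Int) :
    Nat → Int → Int → Int → Int → Int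
  | 0, _, _, _, best => best
  | fuel + 1, x, y, run, best =>
    let nx := x + d0
    let ny := y + d1
    if 0 ≤ nx ∧ nx < 3 ∧ 0 ≤ ny ∧ ny < 3 ∧ bget board nx ny = some "O" then
      o_check_walk board d0 d1 fuel nx ny (run + 1) (max best (run + 1))
    else best

def o_check_alt (board : List (List String)) (dx : List (List Int)) (i : Int) (j : Int) : Int :=
  (PySem.List.pyRange 0 4 1).foldl
    (fun best k =>
      let d0 := dget dx k 0
      let d1 := dget dx k 1
      if d0 = 0 ∧ d1 = 0 then best
      else o_check_walk board d0 d1 12 i j 1 best) 0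

-- ===== PRECONDITION & SPEC =====
-- Pre_-land accessors (independent of the ports): `board[x][y]` for 0 ≤ x, y; the four
-- direction components dx[k][0] / dx[k][1]; Python's wrapped index into a 3-element list;
-- and in-bounds of the 3×3 board.
def pvCell (board : List (List String)) (x y : Int) : Option String :=
  ((board[x.toNat]?).getD [])[y.toNat]?
def pvDir (dx : List (List Int)) (k : Int) : Int × Int :=
  (((dx[k.toNat]?).getD []).headI, ((dx[k.toNat]?).getD []).tail.headI)
def pvW (n : Int) : Int := if n < 0 then n + 3 else n
def pvInB (x y : Int) : Prop := 0 ≤ x ∧ x < 3 ∧ 0 ≤ y ∧ y < 3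

-- Pre_ admits exactly the inputs on which Python A returns a value not affected by negative-
-- index wraparound: ≥ 4 direction pairs of length ≥ 2, a start cell with -3 ≤ i, j < 3, every
-- in-bounds cell a walk can probe (start+d, start+2d, start+3d while the previous holds 'O')
-- present on the board (else A raises IndexError), and no direction's ray meeting the visited
-- mark that A's `visited[i][j] = 1` leaves at the WRAPPED start cell — on such rays A's count
-- is cut short by that leftover mark, an accident of A's negative-index wraparound.
-- per-direction k: no in-bounds ray cell coincides with the wrapped start mark
def pvRaySafe (dx : List (List Int)) (i j k : Int) : Prop :=
  ¬((pvDir dx k).1 = 0 ∧ (pvDir dx k).2 = 0) →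
    ∀ s ∈ ([1, 2, 3, 4, 5] : List Int),
      pvInB (i + s * (pvDir dx k).1) (j + s * (pvDir dx k).2) →
      ¬(i + s * (pvDir dx k).1 = pvW i ∧ j + s * (pvDir dx k).2 = pvW j)
-- per-direction k: the (at most three) cells a walk can probe are present on the board
def pvChainSafe (board : List (List String)) (dx : List (List Int)) (i j k : Int) : Prop :=
  (pvInB (i + (pvDir dx k).1) (j + (pvDir dx k).2) →
    (pvCell board (i + (pvDir dx k).1) (j + (pvDir dx k).2)).isSome = true) ∧
  (pvInB (i + (pvDir dx k).1) (j + (pvDir dx k).2) ∧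
      pvCell board (i + (pvDir dx k).1) (j + (pvDir dx k).2) = some "O" ∧
      pvInB (i + 2 * (pvDir dx k).1) (j + 2 * (pvDir dx k).2) →
    (pvCell board (i + 2 * (pvDir dx k).1) (j + 2 * (pvDir dx k).2)).isSome = true) ∧
  (pvInB (i + (pvDir dx k).1) (j + (pvDir dx k).2) ∧
      pvCell board (i + (pvDir dx k).1) (j + (pvDir dx k).2) = some "O" ∧
      pvInB (i + 2 * (pvDir dx k).1) (j + 2 * (pvDir dx k).2) ∧
      pvCell board (i + 2 * (pvDir dx k).1) (j + 2 * (pvDir dx k).2) = some "O" ∧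
      pvInB (i + 3 * (pvDir dx k).1) (j + 3 * (pvDir dx k).2) →
    (pvCell board (i + 3 * (pvDir dx k).1) (j + 3 * (pvDir dx k).2)).isSome = true)
def Pre_o_check (board : List (List String)) (dx : List (List Int)) (i : Int) (j : Int) : Prop :=
  4 ≤ dx.length ∧ (∀ r ∈ dx.take 4, 2 ≤ r.length) ∧
  -3 ≤ i ∧ i < 3 ∧ -3 ≤ j ∧ j < 3 ∧
  (∀ k ∈ ([0, 1, 2, 3] : List Int), pvRaySafe dx i j k ∧ pvChainSafe board dx i j k)
instance (board : List (List String)) (dx : List (List Int)) (i : Int) (j : Int) : Decidable (Pre_o_check board dx i j) := by unfold Pre_o_check pvRaySafe pvChainSafe pvInB; infer_instance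

def pvWitness_o_check : List (List String) × List (List Int) × Int × Int :=
  ([["O", "O", "O"], ["X", "O", "X"], ["O", "X", "O"]], [[1, 0], [0, 1], [-1, 0], [0, -1]], 1, 1)

def Spec_o_check (board : List (List String)) (dx : List (List Int)) (i : Int) (j : Int) (out : Int) : Prop := out = o_check_alt board dx i j
instance (board : List (List String)) (dx : List (List Int)) (i : Int) (j : Int) (out : Int) : Decidable (Spec_o_check board dx i j out) := by unfold Spec_o_check; infer_instance

-- ===== CLAIM (what is proved, stated in full; the proofs are below) =====
def Claim_equal_o_check : Prop := ∀ (board : List (List String)) (dx : List (List Int)) (i : Int) (j : Int), Dom_o_check board dx i j → Pre_o_check board dx i j → Spec_o_check board dx i j (o_check board dx i j)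

-- ===== LEMMAS AND PROOFS =====

-- the visited matrix stays a 3×3 grid
def DimV (v : List (List Int)) : Prop := v.length = 3 ∧ ∀ r ∈ v, r.length = 3

lemma pyIx_lt {n : Int} (h0 : -3 ≤ n) (h1 : n < 3) : pyIx n < 3 := by
  unfold pyIx; split <;> omega

lemma row_dim (v : List (List Int)) (h : DimV v) (n : Nat) (hn : n < 3) :
    ((v[n]?).getD []).length = 3 := by
  obtain ⟨h1, h2⟩ := h
  have hlt : n < v.length := by omega
  rw [List.getElem?_eq_getElem hlt, Option.getD_some]
  exact h2 _ (List.getElem_mem _)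

lemma dim_vset (v : List (List Int)) (h : DimV v) (x y w : Int) (hx : pyIx x < 3) :
    DimV (vset v x y w) := by
  obtain ⟨h1, h2⟩ := h
  refine ⟨by simp [vset, h1], ?_⟩
  intro r hr
  rcases List.mem_or_eq_of_mem_set hr with hm | hm
  · exact h2 _ hm
  · rw [hm, List.length_set]; exact row_dim v ⟨h1, h2⟩ (pyIx x) hx

lemma vget_vset_self (v : List (List Int)) (h : DimV v) (w : Int) {x y : Int}
    (hx : pyIx x < 3) (hy : pyIx y < 3) :
    vget (vset v x y w) x y = w := by
  have hL := h.1
  have hxl : pyIx x < v.length := by omega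
  have hyl : pyIx y < ((v[pyIx x]?).getD []).length := by
    rw [row_dim v h (pyIx x) hx]; omega
  simp only [vget, vset, List.getElem?_set_self hxl, Option.getD_some,
    List.getElem?_set_self hyl]

lemma vget_vset_ne (v : List (List Int)) (h : DimV v) (w : Int) {x y a b : Int}
    (hx : pyIx x < 3)
    (hne : ¬(pyIx a = pyIx x ∧ pyIx b = pyIx y)) :
    vget (vset v x y w) a b = vget v a b := by
  have hL := h.1
  simp only [vget, vset]
  by_cases hax : pyIx a = pyIx x
  · have hby : pyIx y ≠ pyIx b := fun hby => hne ⟨hax, hby.symm⟩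
    have hxl : pyIx x < v.length := by omega
    rw [hax, List.getElem?_set_self hxl, Option.getD_some, List.getElem?_set_ne hby]
  · have hax' : pyIx x ≠ pyIx a := fun e => hax e.symm
    rw [List.getElem?_set_ne hax']

lemma vget_init (a b : Int) : vget (List.replicate 3 (List.replicate 3 0)) a b = 0 := by
  simp only [vget, List.getElem?_replicate]
  split_ifs with h1
  · simp only [Option.getD_some, List.getElem?_replicate]
    split_ifs <;> simp
  · simp

lemma loop_nil (board : List (List String)) (d0 d1 : Int) (fuel : Nat)
    (v : List (List Int)) (flag : Int) :
    o_check_loop board d0 d1 fuel [] v flag = flag := by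
  cases fuel <;> rfl

lemma loop_zero (board : List (List String)) (x y flag : Int) (v : List (List Int))
    (hvxy : vget v x y ≠ 0) (fuel : Nat) :
    o_check_loop board 0 0 fuel [(x, y)] v flag = flag := by
  cases fuel with
  | zero => rfl
  | succ fuel =>
    simp only [o_check_loop, add_zero]
    split_ifs with hc <;> exact loop_nil board 0 0 fuel v flag

lemma loop_walk (board : List (List String)) (d0 d1 : Int) (hd : ¬(d0 = 0 ∧ d1 = 0)) :
    ∀ (fuel : Nat) (x y run flag : Int) (v : List (List Int)),
      DimV v →
      vget v x y = run →
      (∀ s : Nat, 1 ≤ s → 0 ≤ x + s * d0 → x + s * d0 < 3 → 0 ≤ y + s * d1 → y + s * d1 < 3 →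
        vget v (x + s * d0) (y + s * d1) = 0) →
      o_check_loop board d0 d1 fuel [(x, y)] v flag = o_check_walk board d0 d1 fuel x y run flag := by
  intro fuel
  induction fuel with
  | zero => intro x y run flag v _ _ _; rfl
  | succ fuel ih =>
    intro x y run flag v hv hcur hfresh
    simp only [o_check_loop, o_check_walk]
    by_cases hc : 0 ≤ x + d0 ∧ x + d0 < 3 ∧ 0 ≤ y + d1 ∧ y + d1 < 3 ∧
        bget board (x + d0) (y + d1) = some "O"
    · rw [if_pos hc, if_pos hc]
      have h1 : vget v (x + d0) (y + d1) = 0 := by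
        have := hfresh 1 le_rfl
        simp only [Nat.cast_one, one_mul] at this
        exact this hc.1 hc.2.1 hc.2.2.1 hc.2.2.2.1
      rw [if_pos h1, hcur, List.nil_append]
      have hpx : pyIx (x + d0) < 3 := pyIx_lt (by omega) hc.2.1
      have hpy : pyIx (y + d1) < 3 := pyIx_lt (by omega) hc.2.2.2.1
      have hself : vget (vset v (x + d0) (y + d1) (run + 1)) (x + d0) (y + d1) = run + 1 :=
        vget_vset_self v hv (run + 1) hpx hpy
      rw [hself]
      apply ih (x + d0) (y + d1) (run + 1) (max flag (run + 1)) _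
        (dim_vset v hv _ _ _ hpx) hself
      intro s hs b0 b1 b2 b3
      have hsZ : (s : Int) ≠ 0 := by exact_mod_cast Nat.one_le_iff_ne_zero.mp hs
      have hne : ¬(pyIx (x + d0 + s * d0) = pyIx (x + d0) ∧
          pyIx (y + d1 + s * d1) = pyIx (y + d1)) := by
        rintro ⟨e0, e1⟩
        have e0' : x + d0 + (s : Int) * d0 = x + d0 := by
          have := e0
          unfold pyIx at this
          split_ifs at this <;> omega
        have e1' : y + d1 + (s : Int) * d1 = y + d1 := by
          have := e1
          unfold pyIx at this
          split_ifs at this <;> omega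
        have h0 : (s : Int) * d0 = 0 := by linarith
        have h1' : (s : Int) * d1 = 0 := by linarith
        rcases mul_eq_zero.mp h0 with h | h
        · exact hsZ h
        · rcases mul_eq_zero.mp h1' with h' | h'
          · exact hsZ h'
          · exact hd ⟨h, h'⟩
      rw [vget_vset_ne v hv (run + 1) hpx hne]
      have key0 : x + d0 + (s : Int) * d0 = x + ((s + 1 : Nat) : Int) * d0 := by push_cast; ring
      have key1 : y + d1 + (s : Int) * d1 = y + ((s + 1 : Nat) : Int) * d1 := by push_cast; ring
      rw [key0] at b0 b1 ⊢
      rw [key1] at b2 b3 ⊢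
      exact hfresh (s + 1) (by omega) b0 b1 b2 b3
    · rw [if_neg hc, if_neg hc]
      exact loop_nil board d0 d1 fuel v flag

-- a ray step that stays inside [0,3)² from a start in [-3,3)² has s ≤ 5
lemma ray_bound {i j d0 d1 : Int} (hd : ¬(d0 = 0 ∧ d1 = 0))
    (hi0 : -3 ≤ i) (hi1 : i < 3) (hj0 : -3 ≤ j) (hj1 : j < 3) (s : Nat) (_hs : 1 ≤ s)
    (b0 : 0 ≤ i + s * d0) (b1 : i + s * d0 < 3) (b2 : 0 ≤ j + s * d1) (b3 : j + s * d1 < 3) :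
    (s : Int) ≤ 5 := by
  have hsn : (0 : Int) ≤ (s : Int) := Int.natCast_nonneg s
  by_cases hd0 : d0 = 0
  · have hd1 : d1 ≠ 0 := fun h => hd ⟨hd0, h⟩
    rcases lt_or_gt_of_ne hd1 with h | h
    · have hm : (s : Int) * d1 ≤ (s : Int) * (-1) :=
        mul_le_mul_of_nonneg_left (by omega) hsn
      have : (s : Int) * (-1) = -(s : Int) := by ring
      linarith
    · have hm : (s : Int) * 1 ≤ (s : Int) * d1 :=
        mul_le_mul_of_nonneg_left (by omega) hsn
      have : (s : Int) * 1 = (s : Int) := by ring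
      linarith
  · rcases lt_or_gt_of_ne hd0 with h | h
    · have hm : (s : Int) * d0 ≤ (s : Int) * (-1) :=
        mul_le_mul_of_nonneg_left (by omega) hsn
      have : (s : Int) * (-1) = -(s : Int) := by ring
      linarith
    · have hm : (s : Int) * 1 ≤ (s : Int) * d0 :=
        mul_le_mul_of_nonneg_left (by omega) hsn
      have : (s : Int) * 1 = (s : Int) := by ring
      linarith

lemma dir_eq (board : List (List String)) (i j : Int)
    (hi0 : -3 ≤ i) (hi1 : i < 3) (hj0 : -3 ≤ j) (hj1 : j < 3) (d0 d1 flag : Int)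
    (hW : ¬(d0 = 0 ∧ d1 = 0) →
      ∀ s ∈ ([1, 2, 3, 4, 5] : List Int),
        pvInB (i + s * d0) (j + s * d1) → ¬(i + s * d0 = pvW i ∧ j + s * d1 = pvW j)) :
    o_check_loop board d0 d1 12 [(i, j)] (vset (List.replicate 3 (List.replicate 3 0)) i j 1) flag
      = if d0 = 0 ∧ d1 = 0 then flag else o_check_walk board d0 d1 12 i j 1 flag := by
  have hdim : DimV (List.replicate 3 (List.replicate 3 (0 : Int))) :=
    ⟨rfl, fun r hr => by rw [List.eq_of_mem_replicate hr]; rfl⟩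
  have hpi : pyIx i < 3 := pyIx_lt hi0 hi1
  have hpj : pyIx j < 3 := pyIx_lt hj0 hj1
  have hcur : vget (vset (List.replicate 3 (List.replicate 3 0)) i j 1) i j = 1 :=
    vget_vset_self _ hdim 1 hpi hpj
  by_cases hd : d0 = 0 ∧ d1 = 0
  · rw [if_pos hd, hd.1, hd.2]
    exact loop_zero board i j flag _ (by rw [hcur]; norm_num) 12
  · rw [if_neg hd]
    apply loop_walk board d0 d1 hd 12 i j 1 flag _ (dim_vset _ hdim i j 1 hpi) hcur
    intro s hs b0 b1 b2 b3
    have hs5 : (s : Int) ≤ 5 := ray_bound hd hi0 hi1 hj0 hj1 s hs b0 b1 b2 b3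
    have hs1 : (1 : Int) ≤ (s : Int) := by exact_mod_cast hs
    have hmem : (s : Int) ∈ ([1, 2, 3, 4, 5] : List Int) := by
      simp only [List.mem_cons, List.not_mem_nil, or_false]
      omega
    have hhit := hW hd (s : Int) hmem ⟨b0, b1, b2, b3⟩
    have hne : ¬(pyIx (i + s * d0) = pyIx i ∧ pyIx (j + s * d1) = pyIx j) := by
      rintro ⟨e0, e1⟩
      apply hhit
      constructor
      · unfold pyIx at e0; unfold pvW; split_ifs at e0 ⊢ <;> omega
      · unfold pyIx at e1; unfold pvW; split_ifs at e1 ⊢ <;> omega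
    rw [vget_vset_ne _ hdim 1 hpi hne]
    exact vget_init _ _

-- dget (port side) computes pvDir (Pre_ side) on the indices Pre_ admits
lemma dget_pvDir (dx : List (List Int)) (k : Int) (hk : 0 ≤ k) (hlen : k.toNat < dx.length) :
    dget dx k 0 = (pvDir dx k).1 ∧ dget dx k 1 = (pvDir dx k).2 := by
  have hsome : PySem.List.pyGet? dx k = some (dx[k.toNat]'hlen) :=
    PySem.List.pyGet?_eq_some_getElem (xs := dx) (i := k) hk (by omega)
  have hrow : (dx[k.toNat]?).getD [] = dx[k.toNat]'hlen := by
    rw [List.getElem?_eq_getElem hlen, Option.getD_some]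
  constructor <;> · simp only [dget, pvDir, hsome, Option.bind_some, hrow]
                    cases dx[k.toNat]'hlen with
                    | nil => simp [PySem.List.pyGet?]
                    | cons a t =>
                        cases t <;> simp [PySem.List.pyGet?, PySem.List.pyIdx?] <;>
                          rw [if_pos (by positivity)] <;> simp

-- ===== VERDICT (by name: the statement is the Claim_ definition above) =====
theorem o_check_spec : Claim_equal_o_check := by
  intro board dx i j _ hpre
  obtain ⟨hdx, hdxr, hi0, hi1, hj0, hj1, hsafe⟩ := hpre
  unfold Spec_o_check o_check o_check_alt
  have hR : PySem.List.pyRange 0 4 1 = [0, 1, 2, 3] := by decide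
  have hg0 := dget_pvDir dx 0 (by norm_num) (by omega)
  have hg1 := dget_pvDir dx 1 (by norm_num) (by omega)
  have hg2 := dget_pvDir dx 2 (by norm_num) (by omega)
  have hg3 := dget_pvDir dx 3 (by norm_num) (by omega)
  have hW0 := (hsafe 0 (by simp)).1
  have hW1 := (hsafe 1 (by simp)).1
  have hW2 := (hsafe 2 (by simp)).1
  have hW3 := (hsafe 3 (by simp)).1
  unfold pvRaySafe at hW0 hW1 hW2 hW3
  rw [← hg0.1, ← hg0.2] at hW0
  rw [← hg1.1, ← hg1.2] at hW1
  rw [← hg2.1, ← hg2.2] at hW2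
  rw [← hg3.1, ← hg3.2] at hW3
  rw [hR]
  simp only [List.foldl]
  rw [dir_eq board i j hi0 hi1 hj0 hj1 (dget dx 0 0) (dget dx 0 1) _ hW0,
    dir_eq board i j hi0 hi1 hj0 hj1 (dget dx 1 0) (dget dx 1 1) _ hW1,
    dir_eq board i j hi0 hi1 hj0 hj1 (dget dx 2 0) (dget dx 2 1) _ hW2,
    dir_eq board i j hi0 hi1 hj0 hj1 (dget dx 3 0) (dget dx 3 1) _ hW3]
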